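-- pv_equiv track=rewrite | github.com/guaardvark/guaardvark | backend/utils/bulk_csv_generator.py | create_data_center_topics
-- ===== SOURCE A (Python) =====
-- from typing import Dict, List, Optional, Tuple, Any
--
-- def create_data_center_topics(count: int = 100) -> List[str]:
--     """Generate data center related topics for Imperial Data Center"""
--     base_topics = [
--         "Data Center Site Selection Legal Requirements",
--         "Construction Permits for Data Center Development",
--         "Data Center Financing Legal Structures",
--         "Regulatory Compliance for Data Center Operations",
--         "Data Center Real Estate Due Diligence",
--         "Environmental Impact Assessment for Data Centers",
--         "Data Center Lease Agreement Negotiations",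
--         "Zoning Laws for Data Center Construction",
--         "Data Center Security Compliance Requirements",
--         "Power Purchase Agreements for Data Centers",
--         "Data Center Tax Incentives and Legal Benefits",
--         "Intellectual Property Protection in Data Centers",
--         "Data Center Acquisition Legal Framework",
--         "Cross-Border Data Center Legal Considerations",
--         "Data Center Insurance and Liability Coverage",
--         "Energy Efficiency Legal Requirements for Data Centers",
--         "Data Center Employment Law Compliance",
--         "Telecommunications Licensing for Data Centers",
--         "Data Center Emergency Response Legal Planning",
--         "GDPR Compliance for Data Center Operations"
--     ]
--
--     # Expand the list to reach the desired count
--     topics = []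
--     while len(topics) < count:
--         for base_topic in base_topics:
--             if len(topics) >= count:
--                 break
--
--             # Add variations
--             variations = [
--                 base_topic,
--                 f"{base_topic} Best Practices",
--                 f"{base_topic} Checklist",
--                 f"{base_topic} Guide",
--                 f"{base_topic} Requirements"
--             ]
--
--             for variation in variations:
--                 if len(topics) < count:
--                     topics.append(variation)
--
--     return topics[:count]
-- ===== SOURCE B (Python) =====
-- def create_data_center_topics(count: int = 100) -> list:
--     """Generate data center related topics for Imperial Data Center"""
--     base_topics = [
--         "Data Center Site Selection Legal Requirements",
--         "Construction Permits for Data Center Development",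
--         "Data Center Financing Legal Structures",
--         "Regulatory Compliance for Data Center Operations",
--         "Data Center Real Estate Due Diligence",
--         "Environmental Impact Assessment for Data Centers",
--         "Data Center Lease Agreement Negotiations",
--         "Zoning Laws for Data Center Construction",
--         "Data Center Security Compliance Requirements",
--         "Power Purchase Agreements for Data Centers",
--         "Data Center Tax Incentives and Legal Benefits",
--         "Intellectual Property Protection in Data Centers",
--         "Data Center Acquisition Legal Framework",
--         "Cross-Border Data Center Legal Considerations",
--         "Data Center Insurance and Liability Coverage",
--         "Energy Efficiency Legal Requirements for Data Centers",
--         "Data Center Employment Law Compliance",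
--         "Telecommunications Licensing for Data Centers",
--         "Data Center Emergency Response Legal Planning",
--         "GDPR Compliance for Data Center Operations"
--     ]
--     suffixes = ["", " Best Practices", " Checklist", " Guide", " Requirements"]
--     # Closed-form random access: the i-th topic is determined by index arithmetic
--     # alone (no accumulator, no tiling, no length checks): the suffix cycles with
--     # period 5 and the base topic advances every 5 items, cycling through the 20
--     # bases.
--     return [base_topics[(i // 5) % 20] + suffixes[i % 5] for i in range(count)]
-- ===== Notes on version B (the rewrite author's own statement) =====
-- stated objective: simpler
-- what changed: Replaces A's stateful sequential generation (nested while/for/for appending with per-append length checks until the list is long enough) by a closed-form index formula: the i-th topic is computed independently as base_topics[(i//5)%20] + suffixes[i%5], with no accumulator, no break conditions and no final slice.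
import Mathlib
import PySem

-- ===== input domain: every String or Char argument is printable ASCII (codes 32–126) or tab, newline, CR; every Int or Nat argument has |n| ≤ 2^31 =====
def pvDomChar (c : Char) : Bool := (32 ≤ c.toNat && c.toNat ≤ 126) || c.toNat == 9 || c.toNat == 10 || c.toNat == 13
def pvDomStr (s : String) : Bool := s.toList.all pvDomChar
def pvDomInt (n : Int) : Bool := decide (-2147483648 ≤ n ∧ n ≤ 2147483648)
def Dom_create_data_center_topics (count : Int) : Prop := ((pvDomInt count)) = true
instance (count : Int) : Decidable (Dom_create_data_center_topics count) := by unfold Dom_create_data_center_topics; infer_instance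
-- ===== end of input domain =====

-- B computes each topic directly from its index (base_topics[(i//5)%20] + suffixes[i%5])
-- instead of A's sequential generation with length-guarded appends (objective: simpler).

-- ===== PORT A =====
def pvBaseTopics : List String := [
  "Data Center Site Selection Legal Requirements",
  "Construction Permits for Data Center Development",
  "Data Center Financing Legal Structures",
  "Regulatory Compliance for Data Center Operations",
  "Data Center Real Estate Due Diligence",
  "Environmental Impact Assessment for Data Centers",
  "Data Center Lease Agreement Negotiations",
  "Zoning Laws for Data Center Construction",
  "Data Center Security Compliance Requirements",
  "Power Purchase Agreements for Data Centers",
  "Data Center Tax Incentives and Legal Benefits",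
  "Intellectual Property Protection in Data Centers",
  "Data Center Acquisition Legal Framework",
  "Cross-Border Data Center Legal Considerations",
  "Data Center Insurance and Liability Coverage",
  "Energy Efficiency Legal Requirements for Data Centers",
  "Data Center Employment Law Compliance",
  "Telecommunications Licensing for Data Centers",
  "Data Center Emergency Response Legal Planning",
  "GDPR Compliance for Data Center Operations"]

-- the five variations A builds for each base topic
def pvVariations (b : String) : List String :=
  [b, b ++ " Best Practices", b ++ " Checklist", b ++ " Guide", b ++ " Requirements"]

-- inner 'for variation in variations: if len(topics) < count: topics.append(variation)'
def pvAddVars (count : Int) (topics : List String) : List String → List String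
  | [] => topics
  | v :: rest =>
      pvAddVars count (if (topics.length : Int) < count then topics ++ [v] else topics) rest

-- 'for base_topic in base_topics: if len(topics) >= count: break; …'
def pvForBases (count : Int) (topics : List String) : List String → List String
  | [] => topics
  | b :: rest =>
      if (topics.length : Int) ≥ count then topics
      else pvForBases count (pvAddVars count topics (pvVariations b)) rest

theorem pvAddVars_len_ge (count : Int) (topics : List String) (vs : List String) :
    topics.length ≤ (pvAddVars count topics vs).length := by
  induction vs generalizing topics with
  | nil => simp [pvAddVars]
  | cons v rest ih =>
      simp only [pvAddVars]
      split
      · exact le_trans (by simp) (ih _)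
      · exact ih _

theorem pvForBases_len_ge (count : Int) (topics : List String) (bases : List String) :
    topics.length ≤ (pvForBases count topics bases).length := by
  induction bases generalizing topics with
  | nil => simp [pvForBases]
  | cons b rest ih =>
      simp only [pvForBases]
      split
      · exact le_refl _
      · exact le_trans (pvAddVars_len_ge count topics (pvVariations b)) (ih _)

theorem pvAddVars_len_lt (count : Int) (topics : List String) (v : String) (rest : List String)
    (h : (topics.length : Int) < count) :
    topics.length < (pvAddVars count topics (v :: rest)).length := by
  simp only [pvAddVars, if_pos h]
  have h2 := pvAddVars_len_ge count (topics ++ [v]) rest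
  simp only [List.length_append, List.length_cons, List.length_nil] at h2
  omega

theorem pvForBases_len_lt (count : Int) (topics : List String) (bases : List String)
    (hne : bases ≠ []) (h : (topics.length : Int) < count) :
    topics.length < (pvForBases count topics bases).length := by
  cases bases with
  | nil => exact absurd rfl hne
  | cons b bs =>
      simp only [pvForBases, if_neg (not_le.mpr h)]
      exact lt_of_lt_of_le (pvAddVars_len_lt count topics b _ h)
        (pvForBases_len_ge count _ bs)

-- 'while len(topics) < count: for base_topic in base_topics: …'
def pvWhile (count : Int) (topics : List String) : List String :=
  if _h : (topics.length : Int) < count then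
    pvWhile count (pvForBases count topics pvBaseTopics)
  else topics
termination_by (count - topics.length).toNat
decreasing_by
  have hne : pvBaseTopics ≠ [] := by simp [pvBaseTopics]
  have := pvForBases_len_lt count topics pvBaseTopics hne _h
  omega

def create_data_center_topics (count : Int) : List String :=
  PySem.List.slice (pvWhile count []) none (some count)   -- topics[:count]

-- ===== PORT B =====
def pvSuffixes : List String := ["", " Best Practices", " Checklist", " Guide", " Requirements"]

-- base_topics[(i // 5) % 20] + suffixes[i % 5]; both indices are always in range
-- (0 ≤ (i//5)%20 < 20, 0 ≤ i%5 < 5 for i ≥ 0), so the total pyGetD is exact here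
def pvTopic (i : Int) : String :=
  PySem.List.pyGetD pvBaseTopics (PySem.Int.mod (PySem.Int.floordiv i 5) 20) "" ++
  PySem.List.pyGetD pvSuffixes (PySem.Int.mod i 5) ""

-- [base_topics[(i // 5) % 20] + suffixes[i % 5] for i in range(count)]
def create_data_center_topics_alt (count : Int) : List String :=
  (PySem.List.pyRange 0 count 1).map pvTopic

-- ===== PRECONDITION & SPEC =====
def Spec_create_data_center_topics (count : Int) (out : List String) : Prop := out = create_data_center_topics_alt count
instance (count : Int) (out : List String) : Decidable (Spec_create_data_center_topics count out) := by unfold Spec_create_data_center_topics; infer_instance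

-- ===== CLAIM (what is proved, stated in full; the proofs are below) =====
def Claim_equal_create_data_center_topics : Prop := ∀ (count : Int), Dom_create_data_center_topics count → Spec_create_data_center_topics count (create_data_center_topics count)

-- ===== LEMMAS AND PROOFS =====

-- the 100-topic period A's loop produces in one full pass (proof-only device)
def pvPattern : List String := pvBaseTopics.flatMap pvVariations

theorem pattern_len : pvPattern.length = 100 := by decide

-- the inner for-loop appends a prefix of the variation list
theorem pvAddVars_eq (count : Int) (topics vs : List String) :
    pvAddVars count topics vs = topics ++ vs.take ((count - topics.length).toNat) := by
  induction vs generalizing topics with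
  | nil => simp [pvAddVars]
  | cons v rest ih =>
      simp only [pvAddVars]
      split
      · rename_i h
        rw [ih]
        have : (count - (topics ++ [v]).length).toNat = (count - topics.length).toNat - 1 := by
          simp; omega
        rw [this]
        have hpos : 0 < (count - topics.length).toNat := by omega
        obtain ⟨n, hn⟩ : ∃ n, (count - topics.length).toNat = n + 1 :=
          ⟨_, (Nat.succ_pred_eq_of_pos hpos).symm⟩
        simp [hn]
      · rename_i h
        rw [ih]
        have : (count - topics.length).toNat = 0 := by omega
        simp [this]

-- the middle for-loop appends a prefix of the concatenated variation lists
theorem pvForBases_eq (count : Int) (topics bases : List String) :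
    pvForBases count topics bases
      = topics ++ (bases.flatMap pvVariations).take ((count - topics.length).toNat) := by
  induction bases generalizing topics with
  | nil => simp [pvForBases]
  | cons b rest ih =>
      simp only [pvForBases]
      split
      · rename_i h
        have : (count - topics.length).toNat = 0 := by omega
        simp [this]
      · rename_i h
        rw [not_le] at h
        rw [pvAddVars_eq, ih]
        rw [List.flatMap_cons, List.take_append, List.append_assoc]
        congr 2
        have hlen : (topics ++ (pvVariations b).take ((count - topics.length).toNat)).length
            = topics.length + min ((count - topics.length).toNat) (pvVariations b).length := by
          simp
        rw [hlen]
        congr 1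
        have : (pvVariations b).length = 5 := by simp [pvVariations]
        omega

-- the while loop: appends enough copies of the period, truncated to count
theorem pvWhile_eq (m : Nat) (count : Int) (topics : List String)
    (hm : count - topics.length ≤ 100 * m) :
    pvWhile count topics
      = topics ++ ((List.replicate m pvPattern).flatten).take ((count - topics.length).toNat) := by
  induction m generalizing topics with
  | zero =>
      rw [pvWhile.eq_def]
      have : ¬ ((topics.length : Int) < count) := by omega
      rw [dif_neg this]
      have h0 : (count - topics.length).toNat = 0 := by omega
      simp [h0]
  | succ m ih =>
      rw [pvWhile.eq_def]
      by_cases h : (topics.length : Int) < count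
      · rw [dif_pos h, pvForBases_eq]
        show pvWhile count (topics ++ pvPattern.take _) = _
        by_cases hc : count - topics.length ≤ 100
        · -- this pass reaches count; after it, the guard fails
          have hlen : (topics ++ pvPattern.take ((count - topics.length).toNat)).length
              = (count).toNat := by
            simp [pattern_len]; omega
          rw [pvWhile.eq_def]
          have hstop : ¬ (((topics ++ pvPattern.take ((count - topics.length).toNat)).length : Int) < count) := by
            rw [hlen]; omega
          rw [dif_neg hstop]
          rw [List.replicate_succ, List.flatten_cons, List.take_append]
          have hz : (count - topics.length).toNat - pvPattern.length = 0 := by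
            rw [pattern_len]; omega
          simp
          exact Or.inl (by omega)
        · -- full pass of 100, recurse
          rw [not_le] at hc
          have htk : pvPattern.take ((count - topics.length).toNat) = pvPattern := by
            apply List.take_of_length_le
            rw [pattern_len]; omega
          rw [htk]
          rw [ih (topics ++ pvPattern) (by simp [pattern_len]; omega)]
          rw [List.replicate_succ, List.flatten_cons, List.take_append]
          have h1 : ((count - topics.length).toNat) - pvPattern.length
              = (count - (topics ++ pvPattern).length).toNat := by
            simp [pattern_len]; omega
          rw [List.append_assoc]
          congr 2
          · exact htk.symm ▸ rfl
          · rw [h1]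
      · rw [dif_neg h]
        have h0 : (count - topics.length).toNat = 0 := by omega
        simp [h0]

-- the period element at position 5*a+b is base a with suffix b
theorem pattern_get : ∀ a < 20, ∀ b < 5,
    pvPattern.getD (5 * a + b) "" = pvBaseTopics.getD a "" ++ pvSuffixes.getD b "" := by
  decide

-- B's per-index formula hits the period cyclically
theorem topic_eq (k : Nat) : pvTopic (k : Int) = pvPattern.getD (k % 100) "" := by
  unfold pvTopic
  have h5 : (0:Int) < 5 := by norm_num
  have h20 : (0:Int) < 20 := by norm_num
  have hfd : PySem.Int.floordiv (k : Int) 5 = ((k / 5 : Nat) : Int) := by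
    rw [PySem.Int.floordiv_eq_ediv_of_pos h5]; omega
  have hm1 : PySem.Int.mod ((k / 5 : Nat) : Int) 20 = (((k / 5) % 20 : Nat) : Int) := by
    rw [PySem.Int.mod_eq_emod_of_pos h20]; omega
  have hm2 : PySem.Int.mod (k : Int) 5 = ((k % 5 : Nat) : Int) := by
    rw [PySem.Int.mod_eq_emod_of_pos h5]; omega
  rw [hfd, hm1, hm2, PySem.List.pyGetD_natCast, PySem.List.pyGetD_natCast]
  have := pattern_get ((k / 5) % 20) (by omega) (k % 5) (by omega)
  rw [← this]
  congr 1
  omega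

-- one full period, read through the cyclic formula, is the period itself
theorem range100_map : (List.range 100).map (fun j => pvPattern.getD (j % 100) "") = pvPattern := by
  apply List.ext_getElem
  · simp [pattern_len]
  · intro i h1 h2
    have hi : i < 100 := by simpa using h1
    simp [Nat.mod_eq_of_lt hi, List.getD_eq_getElem?_getD,
      List.getElem?_eq_getElem (by rw [pattern_len]; omega : i < pvPattern.length)]

-- tiling m copies of the period and truncating = reading indices through the cyclic formula
set_option maxRecDepth 10000 in
theorem tile_take (m : Nat) : ∀ n : Nat, n ≤ 100 * m →
    ((List.replicate m pvPattern).flatten).take n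
      = (List.range n).map (fun j => pvPattern.getD (j % 100) "") := by
  induction m with
  | zero => intro n hn; interval_cases n; simp
  | succ m ih =>
      intro n hn
      rw [List.replicate_succ, List.flatten_cons, List.take_append]
      by_cases hc : n ≤ 100
      · have hz : n - pvPattern.length = 0 := by rw [pattern_len]; omega
        rw [hz]
        simp only [List.take_zero, List.append_nil]
        apply List.ext_getElem
        · simp [pattern_len]; omega
        · intro i h1 h2
          have hi : i < n := by simpa [pattern_len] using h2
          have hi100 : i < 100 := by omega
          simp [Nat.mod_eq_of_lt hi100, List.getD_eq_getElem?_getD,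
            List.getElem?_eq_getElem (by omega : i < pvPattern.length)]
      · rw [not_le] at hc
        have htk : pvPattern.take n = pvPattern := by
          apply List.take_of_length_le; rw [pattern_len]; omega
        rw [htk, pattern_len, ih (n - 100) (by omega)]
        have hsplit : n = 100 + (n - 100) := by omega
        conv_rhs => rw [hsplit, List.range_add, List.map_append, List.map_map]
        rw [range100_map]
        congr 1
        refine List.map_congr_left (fun j _ => ?_)
        simp only [Function.comp]
        congr 1
        omega

-- B unrolled to the cyclic formula
theorem alt_eq (count : Int) :
    create_data_center_topics_alt count
      = (List.range count.toNat).map (fun j => pvPattern.getD (j % 100) "") := by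
  unfold create_data_center_topics_alt
  rw [PySem.List.pyRange_one, List.map_map]
  have h1 : (count - 0).toNat = count.toNat := by omega
  rw [h1]
  congr 1
  funext k
  simp only [Function.comp, zero_add]
  exact topic_eq k

-- ===== VERDICT (by name: the statement is the Claim_ definition above) =====
theorem create_data_center_topics_spec : Claim_equal_create_data_center_topics := by
  intro count _
  unfold Spec_create_data_center_topics create_data_center_topics
  rw [pvWhile_eq count.toNat count [] (by simp; omega)]
  simp only [List.nil_append, List.length_nil, Nat.cast_zero, sub_zero]
  by_cases hc : 0 ≤ count
  · rw [PySem.List.slice_to _ hc, List.take_take, min_self, alt_eq,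
      tile_take count.toNat count.toNat (by omega)]
  · have h0 : count.toNat = 0 := by omega
    rw [h0]
    simp only [List.replicate_zero, List.flatten_nil, List.take_nil]
    unfold create_data_center_topics_alt
    rw [PySem.List.pyRange_one_eq_nil (by omega)]
    simp [PySem.List.slice, PySem.List.clampIdx]
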